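-- pv_equiv track=rewrite | github.com/lying2020/VoCoT | DARE_anonymous/frozenlake_datagenerator/frozen_lake_unfied_balance.py | generate_safe_map
-- ===== SOURCE A (Python) =====
-- def generate_safe_map(size, start=(0, 0), goal=None):
--     if goal is None:
--         goal = (size - 1, size - 1)
--     desc = []
--     for i in range(size):
--         row = []
--         for j in range(size):
--             if (i, j) == start:
--                 row.append('S')
--             elif (i, j) == goal:
--                 row.append('G')
--             elif (i + j) % 4 == 0 and (i, j) not in (start, goal):
--                 row.append('H')
--             else:
--                 row.append('F')
--         desc.append("".join(row))
--     return desc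
-- ===== SOURCE B (Python) =====
-- def generate_safe_map(size, start=(0, 0), goal=None):
--     if goal is None:
--         goal = (size - 1, size - 1)
--     # The hole pattern (i+j)%4==0 is periodic: every row is a window of the
--     # tiled string "HFFF"... shifted by i%4.  Build each row by slicing that
--     # tiled string, then splice the markers in with string surgery
--     # (goal first, start last so start wins when they coincide).
--     base = "HFFF" * (size // 4 + 2)
--     desc = []
--     for i in range(size):
--         row = base[i % 4 : i % 4 + size]
--         for (r, c), ch in ((goal, 'G'), (start, 'S')):
--             if r == i and 0 <= c < size:
--                 row = row[:c] + ch + row[c + 1:]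
--         desc.append(row)
--     return desc
-- ===== Notes on version B (the rewrite author's own statement) =====
-- stated objective: alternative
-- what changed: B exploits the periodicity of the hole pattern: it tiles the string 'HFFF' once, slices a shifted window of it for each row (no per-cell loop or branching), and then splices the goal and start markers into the affected rows by string surgery (start spliced last so it wins ties), instead of A's per-cell four-way priority cascade.
import Mathlib
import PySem

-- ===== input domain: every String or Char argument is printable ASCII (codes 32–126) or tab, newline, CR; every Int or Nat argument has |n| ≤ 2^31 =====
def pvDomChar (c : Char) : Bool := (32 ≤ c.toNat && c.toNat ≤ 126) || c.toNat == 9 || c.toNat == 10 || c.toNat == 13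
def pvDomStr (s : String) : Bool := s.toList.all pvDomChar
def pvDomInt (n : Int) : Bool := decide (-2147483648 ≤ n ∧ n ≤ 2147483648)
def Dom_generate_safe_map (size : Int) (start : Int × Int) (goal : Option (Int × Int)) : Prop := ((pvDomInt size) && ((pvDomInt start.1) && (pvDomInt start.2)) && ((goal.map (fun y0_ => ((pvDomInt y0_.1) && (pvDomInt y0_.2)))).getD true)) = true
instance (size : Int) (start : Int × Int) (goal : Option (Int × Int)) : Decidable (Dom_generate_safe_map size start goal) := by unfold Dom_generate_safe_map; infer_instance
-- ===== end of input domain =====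

-- B exploits the periodicity of the hole pattern: each row is a shifted window of the
-- tiled string "HFFF…", sliced whole, with the two markers spliced in afterwards by
-- string surgery (start last, so it wins ties); A decides every cell one by one with a
-- four-way priority cascade. Objective: alternative decomposition, same cost.

-- ===== PORT A =====
def generate_safe_map (size : Int) (start : Int × Int) (goal : Option (Int × Int)) : List String :=
  let g := goal.getD (size - 1, size - 1)   -- if goal is None: goal = (size-1, size-1)
  (PySem.List.pyRange 0 size 1).foldl (fun desc i =>
    desc ++ [String.ofList ((PySem.List.pyRange 0 size 1).foldl (fun row j =>
      row ++ [if (i, j) = start then 'S'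
              else if (i, j) = g then 'G'
              else if PySem.Int.mod (i + j) 4 = 0 ∧ (i, j) ≠ start ∧ (i, j) ≠ g then 'H'
              else 'F']) [])]) []

-- ===== PORT B =====
def generate_safe_map_alt (size : Int) (start : Int × Int) (goal : Option (Int × Int)) : List String :=
  let g := goal.getD (size - 1, size - 1)
  -- base = "HFFF" * (size // 4 + 2): string repetition, as a char list
  let base := List.flatten (List.replicate (PySem.Int.floordiv size 4 + 2).toNat ['H', 'F', 'F', 'F'])
  (PySem.List.pyRange 0 size 1).foldl (fun desc i =>
    -- row = base[i % 4 : i % 4 + size] — both bounds nonnegative (i ≥ 0), so drop/take is exact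
    let row0 := (base.drop (PySem.Int.mod i 4).toNat).take size.toNat
    let row := [(g, 'G'), (start, 'S')].foldl (fun row p =>
      if p.1.1 = i ∧ 0 ≤ p.1.2 ∧ p.1.2 < size then
        -- row[:c] + ch + row[c+1:] with 0 ≤ c, so take/drop is exact
        row.take p.1.2.toNat ++ [p.2] ++ row.drop (p.1.2.toNat + 1)
      else row) row0
    desc ++ [String.ofList row]) []

-- ===== PRECONDITION & SPEC =====
def Spec_generate_safe_map (size : Int) (start : Int × Int) (goal : Option (Int × Int)) (out : List String) : Prop := out = generate_safe_map_alt size start goal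
instance (size : Int) (start : Int × Int) (goal : Option (Int × Int)) (out : List String) : Decidable (Spec_generate_safe_map size start goal out) := by unfold Spec_generate_safe_map; infer_instance

-- ===== CLAIM (what is proved, stated in full; the proofs are below) =====
def Claim_equal_generate_safe_map : Prop := ∀ (size : Int) (start : Int × Int) (goal : Option (Int × Int)), Dom_generate_safe_map size start goal → Spec_generate_safe_map size start goal (generate_safe_map size start goal)

-- ===== LEMMAS AND PROOFS =====

-- foldl-append is map
theorem pv_foldl_push {α β : Type} (f : α → β) :
    ∀ (l : List α) (init : List β),
      l.foldl (fun acc x => acc ++ [f x]) init = init ++ l.map f := by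
  intro l
  induction l with
  | nil => intro init; simp
  | cons x xs ih => intro init; simp [List.foldl_cons, ih]

-- the tiled base string: character k is 'H' exactly when k % 4 = 0
theorem pv_base_getElem (n : Nat) :
    ∀ (k : Nat) (hk : k < (List.flatten (List.replicate n ['H', 'F', 'F', 'F'])).length),
      (List.flatten (List.replicate n ['H', 'F', 'F', 'F']))[k] =
        if k % 4 = 0 then 'H' else 'F' := by
  induction n with
  | zero => intro k hk; simp at hk
  | succ m ih =>
    intro k hk
    simp only [List.replicate_succ, List.flatten_cons]
    by_cases h4 : k < 4
    · rw [List.getElem_append_left (by simp; omega)]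
      interval_cases k <;> simp
    · rw [List.getElem_append_right (by simp; omega)]
      have hk' : k - 4 < (List.flatten (List.replicate m ['H', 'F', 'F', 'F'])).length := by
        simp at hk ⊢; omega
      have h44 : (['H','F','F','F'] : List Char).length = 4 := rfl
      simp only [h44]
      rw [ih (k - 4) hk', show (k - 4) % 4 = k % 4 by omega]

-- row[:c] + [ch] + row[c+1:] is row.set c ch
theorem pv_splice_set (l : List Char) (c : Nat) (ch : Char) (h : c < l.length) :
    l.take c ++ [ch] ++ l.drop (c + 1) = l.set c ch := by
  rw [List.set_eq_take_append_cons_drop, if_pos h]; simp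

-- setting one cell of a row that is a map over pyRange
theorem pv_set_map_pyRange (size : Int) (f : Int → Char) (c : Int) (ch : Char)
    (h0 : 0 ≤ c) (h1 : c < size) :
    ((PySem.List.pyRange 0 size 1).map f).set c.toNat ch
      = (PySem.List.pyRange 0 size 1).map (fun j => if j = c then ch else f j) := by
  apply List.ext_getElem
  · simp
  · intro k hk1 hk2
    simp only [List.length_set, List.length_map, PySem.List.length_pyRange_one] at hk1
    have hk : k < (PySem.List.pyRange 0 size 1).length := by
      simp [PySem.List.length_pyRange_one]; omega
    simp only [List.getElem_set, List.getElem_map, PySem.List.getElem_pyRange_one, zero_add]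
    by_cases h : c.toNat = k
    · rw [if_pos h, if_pos (by omega)]
    · rw [if_neg h, if_neg (by intro hc; omega)]

-- the sliced base row equals the per-cell modulo pattern
theorem pv_row0_eq (size i : Int) (h0 : 0 ≤ i) (h1 : i < size) :
    ((List.flatten (List.replicate (PySem.Int.floordiv size 4 + 2).toNat
        ['H', 'F', 'F', 'F'])).drop (PySem.Int.mod i 4).toNat).take size.toNat
      = (PySem.List.pyRange 0 size 1).map
          (fun j => if PySem.Int.mod (i + j) 4 = 0 then 'H' else 'F') := by
  have hsz : 0 < size := by omega
  have hmod : PySem.Int.mod i 4 = i % 4 := PySem.Int.mod_eq_emod_of_pos (by norm_num)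
  have hfd : PySem.Int.floordiv size 4 = size / 4 := PySem.Int.floordiv_eq_ediv_of_pos (by norm_num)
  have hm0 : 0 ≤ i % 4 := Int.emod_nonneg i (by norm_num)
  have hm4 : i % 4 < 4 := Int.emod_lt_of_pos i (by norm_num)
  have hlen : (List.flatten (List.replicate (PySem.Int.floordiv size 4 + 2).toNat
      ['H', 'F', 'F', 'F'])).length = 4 * (PySem.Int.floordiv size 4 + 2).toNat := by
    simp [Nat.mul_comm]
  have hbig : size.toNat + (PySem.Int.mod i 4).toNat ≤ 4 * (PySem.Int.floordiv size 4 + 2).toNat := by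
    rw [hmod, hfd]
    have h1 : 4 * (size / 4) + size % 4 = size := Int.mul_ediv_add_emod size 4
    have h2 : 0 ≤ size % 4 := Int.emod_nonneg size (by norm_num)
    have h3 : size % 4 < 4 := Int.emod_lt_of_pos size (by norm_num)
    have h4 : 0 ≤ size / 4 := Int.ediv_nonneg (by omega) (by norm_num)
    omega
  apply List.ext_getElem
  · simp only [List.length_take, List.length_drop, hlen, List.length_map,
      PySem.List.length_pyRange_one]
    omega
  · intro k hk1 hk2
    simp only [List.length_take, List.length_drop, hlen] at hk1
    simp only [List.length_map, PySem.List.length_pyRange_one] at hk2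
    rw [List.getElem_take, List.getElem_drop]
    rw [pv_base_getElem _ _ (by rw [hlen]; omega)]
    simp only [List.getElem_map, PySem.List.getElem_pyRange_one, zero_add]
    have hmodk : PySem.Int.mod (i + (k : Int)) 4 = (i + (k : Int)) % 4 :=
      PySem.Int.mod_eq_emod_of_pos (by norm_num)
    have hcast : ((PySem.Int.mod i 4).toNat + k) % 4 = 0 ↔ PySem.Int.mod (i + (k : Int)) 4 = 0 := by
      rw [hmodk, hmod]
      zify [hm0]
      omega
    by_cases hc : ((PySem.Int.mod i 4).toNat + k) % 4 = 0
    · rw [if_pos hc, if_pos (hcast.mp hc)]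
    · rw [if_neg hc, if_neg (fun h => hc (hcast.mpr h))]

-- one row of A equals one row of B
theorem pv_row_eq (size i sr sc gr gc : Int) (h0 : 0 ≤ i) (h1 : i < size) :
    ((PySem.List.pyRange 0 size 1).foldl (fun row j =>
      row ++ [if (i, j) = (sr, sc) then 'S'
              else if (i, j) = (gr, gc) then 'G'
              else if PySem.Int.mod (i + j) 4 = 0 ∧ (i, j) ≠ (sr, sc) ∧ (i, j) ≠ (gr, gc) then 'H'
              else 'F']) [])
    = [((gr, gc), 'G'), (((sr, sc) : Int × Int), 'S')].foldl (fun row p =>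
        if p.1.1 = i ∧ 0 ≤ p.1.2 ∧ p.1.2 < size then
          row.take p.1.2.toNat ++ [p.2] ++ row.drop (p.1.2.toNat + 1)
        else row)
      (((List.flatten (List.replicate (PySem.Int.floordiv size 4 + 2).toNat
          ['H', 'F', 'F', 'F'])).drop (PySem.Int.mod i 4).toNat).take size.toNat) := by
  rw [pv_foldl_push, pv_row0_eq size i h0 h1, List.nil_append]
  simp only [List.foldl_cons, List.foldl_nil]
  have hL : ∀ f : Int → Char, ((PySem.List.pyRange 0 size 1).map f).length = size.toNat := by
    intro f; simp [PySem.List.length_pyRange_one]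
  have fin : ∀ (f g : Int → Char),
      (∀ j : Int, 0 ≤ j → j < size → f j = g j) →
      (PySem.List.pyRange 0 size 1).map f = (PySem.List.pyRange 0 size 1).map g := by
    intro f g h
    apply List.map_congr_left
    intro j hj
    rw [PySem.List.mem_pyRange_one] at hj
    exact h j hj.1 hj.2
  by_cases hG : gr = i ∧ 0 ≤ gc ∧ gc < size
  · by_cases hS : sr = i ∧ 0 ≤ sc ∧ sc < size
    · rw [if_pos hG, pv_splice_set _ gc.toNat 'G' (by rw [hL]; omega),
        pv_set_map_pyRange size _ gc 'G' hG.2.1 hG.2.2,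
        if_pos hS, pv_splice_set _ sc.toNat 'S' (by rw [hL]; omega),
        pv_set_map_pyRange size _ sc 'S' hS.2.1 hS.2.2]
      apply fin
      intro j hj0 hj1
      simp only [Prod.mk.injEq, ne_eq]
      split_ifs <;> first | rfl | omega
    · rw [if_pos hG, pv_splice_set _ gc.toNat 'G' (by rw [hL]; omega),
        pv_set_map_pyRange size _ gc 'G' hG.2.1 hG.2.2, if_neg hS]
      apply fin
      intro j hj0 hj1
      simp only [Prod.mk.injEq, ne_eq]
      split_ifs <;> first | rfl | omega
  · by_cases hS : sr = i ∧ 0 ≤ sc ∧ sc < size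
    · rw [if_neg hG, if_pos hS, pv_splice_set _ sc.toNat 'S' (by rw [hL]; omega),
        pv_set_map_pyRange size _ sc 'S' hS.2.1 hS.2.2]
      apply fin
      intro j hj0 hj1
      simp only [Prod.mk.injEq, ne_eq]
      split_ifs <;> first | rfl | omega
    · rw [if_neg hG, if_neg hS]
      apply fin
      intro j hj0 hj1
      simp only [Prod.mk.injEq, ne_eq]
      split_ifs <;> first | rfl | omega

theorem generate_safe_map_eq_alt (size : Int) (start : Int × Int) (goal : Option (Int × Int)) :
    generate_safe_map size start goal = generate_safe_map_alt size start goal := by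
  unfold generate_safe_map generate_safe_map_alt
  obtain ⟨sr, sc⟩ := start
  set g := goal.getD (size - 1, size - 1) with hg
  obtain ⟨gr, gc⟩ := g
  rw [pv_foldl_push (fun i => String.ofList ((PySem.List.pyRange 0 size 1).foldl (fun row j =>
      row ++ [if (i, j) = (sr, sc) then 'S'
              else if (i, j) = (gr, gc) then 'G'
              else if PySem.Int.mod (i + j) 4 = 0 ∧ (i, j) ≠ (sr, sc) ∧ (i, j) ≠ (gr, gc) then 'H'
              else 'F']) [])),
    pv_foldl_push]
  simp only [List.nil_append]
  apply List.map_congr_left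
  intro i hi
  rw [PySem.List.mem_pyRange_one] at hi
  rw [pv_row_eq size i sr sc gr gc hi.1 hi.2]

-- ===== VERDICT (by name: the statement is the Claim_ definition above) =====
theorem generate_safe_map_spec : Claim_equal_generate_safe_map := by
  intro size start goal _
  unfold Spec_generate_safe_map
  exact generate_safe_map_eq_alt size start goal
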